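-- pv_equiv track=rewrite | github.com/jungwoo3490/Algorithm | Programmers/Level 2/괄호 변환.py | solution
-- ===== SOURCE A (Python) =====
-- def solution(p):
--     answer = ''
--     #1단계
--     if not p:
--         return p
-- 	#2단계
--     r = True
--     c = 0
--     for i in range(len(p)):
--         if p[i] == '(':
--             c -= 1
--         else:
--             c += 1
--     #3단계
--         if c > 0:
--             r = False
--         if c == 0:
--             if r:
--                 return p[:i + 1] + solution(p[i + 1:])
--     #4단계
--             else:
--                 return '(' + solution(p[i + 1:]) + ')' + ''.join(list(map(lambda x: '(' if x == ')' else ')', p[1:i])))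
--     return answer
-- ===== SOURCE B (Python) =====
-- def solution(p):
--     # Iterative: peel off primitive balanced chunks left-to-right, collecting
--     # prefix pieces and (for "incorrect" chunks) wrapped suffix pieces, then join.
--     left = []
--     right = []
--     s = p
--     while s:
--         c = 0
--         i = 0
--         n = len(s)
--         while i < n:
--             if s[i] == '(':
--                 c -= 1
--             else:
--                 c += 1
--             i += 1
--             if c == 0:
--                 break
--         if c != 0:
--             break
--         u, s = s[:i], s[i:]
--         if u[0] == '(':
--             left.append(u)
--         else:
--             left.append('(')
--             right.append(')' + ''.join('(' if ch == ')' else ')' for ch in u[1:-1]))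
--     right.reverse()
--     return ''.join(left + right)
-- ===== Notes on version B (the rewrite author's own statement) =====
-- stated objective: alternative
-- what changed: Replaced A's recursion, which re-slices the string and rebuilds the result by string concatenation at every level, with a single iterative loop that peels off primitive balanced chunks, collects prefix and wrapped-suffix pieces in two lists, and joins them once at the end.
import Mathlib
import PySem

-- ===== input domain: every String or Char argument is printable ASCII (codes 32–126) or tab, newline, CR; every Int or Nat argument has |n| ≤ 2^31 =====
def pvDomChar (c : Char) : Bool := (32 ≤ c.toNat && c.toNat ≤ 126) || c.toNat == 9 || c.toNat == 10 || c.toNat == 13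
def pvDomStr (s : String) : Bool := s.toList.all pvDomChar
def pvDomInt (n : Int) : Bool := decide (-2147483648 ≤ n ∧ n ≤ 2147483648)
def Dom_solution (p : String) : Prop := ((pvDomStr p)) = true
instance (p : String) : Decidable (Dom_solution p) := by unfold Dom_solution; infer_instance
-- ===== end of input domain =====

-- B replaces A's recursion (which rebuilds strings by concatenation at every level)
-- by one iterative loop that peels primitive balanced chunks and joins the pieces once.

-- ===== PORT A =====
-- lambda x: '(' if x == ')' else ')'
def flipA (x : Char) : Char := if x = ')' then '(' else ')'

mutual
-- solution(p): 'if not p: return p', then the indexed for-loop (solLoopA) with state r, c.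
def solutionA (p : List Char) : List Char :=
  if p = [] then p else solLoopA p 0 true 0
termination_by (p.length, p.length + 1)

-- the body of 'for i in range(len(p))' with state (r, c); falling off the loop returns
-- answer = ''.  p[:i+1] = take (i+1), p[i+1:] = drop (i+1); p[1:i] = (drop 1).take (i-1)
-- (exact: both slice bounds nonnegative, Nat subtraction matches Python's empty slice for i ≤ 1);
-- p[i]! is exact since i < len(p) inside the loop.
def solLoopA (p : List Char) (i : Nat) (r : Bool) (c : Int) : List Char :=
  if i < p.length then
    let c' := if p[i]! = '(' then c - 1 else c + 1
    let r' := if c' > 0 then false else r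
    if c' = 0 then
      if r' then p.take (i + 1) ++ solutionA (p.drop (i + 1))
      else '(' :: solutionA (p.drop (i + 1)) ++ ')' :: ((p.drop 1).take (i - 1)).map flipA
    else solLoopA p (i + 1) r' c'
  else []
termination_by (p.length, p.length - i)
end

def solution (p : String) : String := String.mk (solutionA p.toList)

-- ===== PORT B =====
def flipB (x : Char) : Char := if x = ')' then '(' else ')'

-- inner 'while i < n' scan of Source B: returns (i, c) as they are left at break / loop end
def bScan (s : List Char) (i : Nat) (c : Int) : Nat × Int :=
  if i < s.length then
    let c' := if s[i]! = '(' then c - 1 else c + 1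
    if c' = 0 then (i + 1, c') else bScan s (i + 1) c'
  else (i, c)
termination_by s.length - i

-- outer 'while s' loop of Source B with accumulators left, right; each pass strictly shortens s,
-- so fuel = len(s) (supplied by solution_alt) bounds the iterations and the port is exact.
-- u[1:-1] = (u.drop 1).dropLast (exact for nonempty u, the only case reached);
-- u.head? = some '(' models u[0] == '('.
def bLoop : Nat → List Char → List (List Char) → List (List Char) → List Char
  | 0, _, left, right => (left ++ right.reverse).flatten
  | fuel + 1, s, left, right =>
    if s = [] then (left ++ right.reverse).flatten
    else
      let ic := bScan s 0 0
      if ic.2 ≠ 0 then (left ++ right.reverse).flatten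
      else
        let u := s.take ic.1
        if u.head? = some '(' then bLoop fuel (s.drop ic.1) (left ++ [u]) right
        else bLoop fuel (s.drop ic.1) (left ++ [['(']])
               (right ++ [')' :: ((u.drop 1).dropLast).map flipB])

def solution_alt (p : String) : String := String.mk (bLoop p.toList.length p.toList [] [])

-- ===== PRECONDITION & SPEC =====
def Spec_solution (p : String) (out : String) : Prop := out = solution_alt p
instance (p : String) (out : String) : Decidable (Spec_solution p out) := by unfold Spec_solution; infer_instance

-- ===== CLAIM (what is proved, stated in full; the proofs are below) =====
def Claim_equal_solution : Prop := ∀ (p : String), Dom_solution p → Spec_solution p (solution p)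

-- ===== LEMMAS AND PROOFS =====

theorem bScan_ge (s : List Char) : ∀ n i c, s.length - i ≤ n → i ≤ (bScan s i c).1 := by
  intro n
  induction n with
  | zero =>
    intro i c h
    rw [bScan, if_neg (by omega : ¬ i < s.length)]
  | succ n ih =>
    intro i c h
    rw [bScan]
    by_cases hi : i < s.length
    · simp only [if_pos hi]
      generalize (if s[i]! = '(' then c - 1 else c + 1) = d
      by_cases hz : d = 0
      · simp [hz]
      · simp only [if_neg hz]
        have := ih (i + 1) d (by omega)
        omega
    · rw [if_neg hi]

theorem bScan_fst_pos (s : List Char) (hs : s ≠ []) : 1 ≤ (bScan s 0 0).1 := by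
  have h0 : 0 < s.length := List.length_pos_iff.mpr hs
  rw [bScan, if_pos h0]
  generalize (if s[0]! = '(' then (0:Int) - 1 else 0 + 1) = d
  by_cases hz : d = 0
  · simp [hz]
  · simp only [if_neg hz]
    have := bScan_ge s s.length 1 d (by omega)
    omega


-- A's loop with r = false: r stays false, so a zero hit takes the wrap branch.
theorem solLoopA_false (s : List Char) :
    ∀ n i c, s.length - i ≤ n → c ≠ 0 →
    solLoopA s i false c =
      (if (bScan s i c).2 = 0 then
        '(' :: solutionA (s.drop (bScan s i c).1) ++
          ')' :: ((s.drop 1).take ((bScan s i c).1 - 2)).map flipA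
       else []) := by
  intro n
  induction n with
  | zero =>
    intro i c hn hc
    have hi : ¬ i < s.length := by omega
    rw [solLoopA, bScan, if_neg hi, if_neg hi, if_neg hc]
  | succ n ih =>
    intro i c hn hc
    rw [solLoopA, bScan]
    by_cases hi : i < s.length
    · simp only [if_pos hi]
      generalize hch : (if s[i]! = '(' then c - 1 else c + 1) = d
      rw [ite_self]
      by_cases hz : d = 0
      · simp [hz]
      · simp only [if_neg hz]
        rw [ih (i + 1) _ (by omega) hz]
    · rw [if_neg hi, if_neg hi, if_neg hc]
-- A's loop with r = true and c < 0: c never goes positive, so r stays true.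
theorem solLoopA_neg (s : List Char) :
    ∀ n i c, s.length - i ≤ n → c < 0 →
    solLoopA s i true c =
      (if (bScan s i c).2 = 0 then
        s.take (bScan s i c).1 ++ solutionA (s.drop (bScan s i c).1)
       else []) := by
  intro n
  induction n with
  | zero =>
    intro i c hn hc
    have hi : ¬ i < s.length := by omega
    rw [solLoopA, bScan, if_neg hi, if_neg hi, if_neg (by omega : ¬ c = 0)]
  | succ n ih =>
    intro i c hn hc
    rw [solLoopA, bScan]
    by_cases hi : i < s.length
    · simp only [if_pos hi]
      generalize hch : (if s[i]! = '(' then c - 1 else c + 1) = d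
      have hle : d ≤ 0 := by rw [← hch]; split <;> omega
      rw [if_neg (by omega : ¬ d > 0)]
      by_cases hz : d = 0
      · simp [hz]
      · simp only [if_neg hz]
        rw [ih (i + 1) _ (by omega) (by omega)]
    · rw [if_neg hi, if_neg hi, if_neg (by omega : ¬ c = 0)]
-- one-step characterisation of A in terms of B's scan
theorem solutionA_eq (s : List Char) (hs : s ≠ []) :
    solutionA s =
      (if (bScan s 0 0).2 = 0 then
        (if s.head? = some '(' then
           s.take (bScan s 0 0).1 ++ solutionA (s.drop (bScan s 0 0).1)
         else
           '(' :: solutionA (s.drop (bScan s 0 0).1) ++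
             ')' :: ((s.drop 1).take ((bScan s 0 0).1 - 2)).map flipA)
       else []) := by
  have h0 : 0 < s.length := List.length_pos_iff.mpr hs
  have hhead : s.head? = some s[0]! := by
    cases s with
    | nil => simp at h0
    | cons a t => simp
  rw [solutionA, if_neg hs, solLoopA]
  conv_rhs => rw [bScan]
  simp only [if_pos h0, hhead]
  by_cases hpar : s[0]! = '('
  · simp only [hpar]
    norm_num
    exact solLoopA_neg s (s.length - 1) 1 (-1) (by omega) (by omega)
  · simp only [if_neg hpar]
    norm_num
    have hE := solLoopA_false s (s.length - 1) 1 1 (by omega) (by omega)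
    rw [hE]
    have hpar' : ¬ s[0]?.getD 'A' = '(' := by
      simpa [List.getElem!_eq_getElem?_getD] using hpar
    simp [hpar']

theorem take_head? (s : List Char) (j : Nat) (hj : 1 ≤ j) :
    (s.take j).head? = s.head? := by
  cases s with
  | nil => simp
  | cons a t =>
    cases j with
    | zero => omega
    | succ j => rfl

theorem bScan_le (s : List Char) : ∀ n i c, s.length - i ≤ n → i ≤ s.length → (bScan s i c).1 ≤ s.length := by
  intro n
  induction n with
  | zero =>
    intro i c h hle
    rw [bScan, if_neg (by omega : ¬ i < s.length)]
    simpa using hle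
  | succ n ih =>
    intro i c h hle
    rw [bScan]
    by_cases hi : i < s.length
    · simp only [if_pos hi]
      generalize (if s[i]! = '(' then c - 1 else c + 1) = d
      by_cases hz : d = 0
      · simp only [if_pos hz]
        simpa using (by omega : i + 1 ≤ s.length)
      · simp only [if_neg hz]
        exact ih (i + 1) d (by omega) (by omega)
    · rw [if_neg hi]
      simpa using hle

theorem mid_eq (s : List Char) (j : Nat) (hj : j ≤ s.length) :
    ((s.take j).drop 1).dropLast = (s.drop 1).take (j - 2) := by
  rw [List.dropLast_eq_take, List.drop_take, List.take_take]
  congr 1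
  simp only [List.length_take, List.length_drop]
  omega

theorem bLoop_eq (n : Nat) : ∀ (s : List Char), s.length ≤ n →
    ∀ left right, bLoop n s left right =
      left.flatten ++ solutionA s ++ right.reverse.flatten := by
  induction n with
  | zero =>
    intro s hn left right
    have hs : s = [] := List.eq_nil_of_length_eq_zero (by omega)
    subst hs
    rw [bLoop, solutionA]
    simp
  | succ n ih =>
    intro s hn left right
    by_cases hs : s = []
    · subst hs
      rw [bLoop, solutionA]
      simp
    · rw [bLoop, if_neg hs]
      have hA := solutionA_eq s hs
      by_cases hc : (bScan s 0 0).2 = 0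
      · have hj1 : 1 ≤ (bScan s 0 0).1 := bScan_fst_pos s hs
        have hjle : (bScan s 0 0).1 ≤ s.length := bScan_le s s.length 0 0 (by omega) (by omega)
        have hlen : (s.drop (bScan s 0 0).1).length < s.length := by
          simp only [List.length_drop]
          have : 0 < s.length := List.length_pos_iff.mpr hs
          omega
        have hhd : (s.take (bScan s 0 0).1).head? = s.head? := take_head? s _ hj1
        simp only [if_neg (by simpa using hc : ¬ (bScan s 0 0).2 ≠ 0)]
        by_cases hpar : s.head? = some '('
        · rw [if_pos (by rw [hhd]; exact hpar)]
          rw [ih _ (by simp only [List.length_drop]; omega)]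
          rw [hA, if_pos hc, if_pos hpar]
          simp
        · rw [if_neg (by rw [hhd]; exact hpar)]
          rw [ih _ (by simp only [List.length_drop]; omega)]
          rw [hA, if_pos hc, if_neg hpar]
          rw [mid_eq s _ hjle]
          have hflip : flipB = flipA := rfl
          simp [hflip]
      · simp only [if_pos (by simpa using hc : (bScan s 0 0).2 ≠ 0)]
        rw [hA, if_neg hc]
        simp

-- ===== VERDICT (by name: the statement is the Claim_ definition above) =====
theorem solution_spec : Claim_equal_solution := by
  intro p _
  unfold Spec_solution solution solution_alt
  rw [bLoop_eq p.toList.length p.toList le_rfl [] []]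
  simp
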